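-- pv_equiv track=rewrite | github.com/DerZander/AdventOfPython | src/years/year2023/day03/solution.py | go_backwards
-- ===== SOURCE A (Python) =====
-- def go_backwards(line, end=0):
--     part_number = ""
--     for c in reversed(line[:end]):
--         if c.isdigit():
--             part_number = part_number + c
--         else:
--             break
--     return part_number[::-1]
-- ===== SOURCE B (Python) =====
-- def go_backwards(line, end=0):
--     prefix = line[:end]
--     i = len(prefix)
--     while i > 0 and prefix[i - 1].isdigit():
--         i -= 1
--     return prefix[i:]
-- ===== Notes on version B (the rewrite author's own statement) =====
-- stated objective: simpler
-- what changed: Replaces the char-by-char build-then-reverse accumulation with locating the boundary index of the trailing digit run and returning one slice, so no string concatenation and no final reverse.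
import Mathlib
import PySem

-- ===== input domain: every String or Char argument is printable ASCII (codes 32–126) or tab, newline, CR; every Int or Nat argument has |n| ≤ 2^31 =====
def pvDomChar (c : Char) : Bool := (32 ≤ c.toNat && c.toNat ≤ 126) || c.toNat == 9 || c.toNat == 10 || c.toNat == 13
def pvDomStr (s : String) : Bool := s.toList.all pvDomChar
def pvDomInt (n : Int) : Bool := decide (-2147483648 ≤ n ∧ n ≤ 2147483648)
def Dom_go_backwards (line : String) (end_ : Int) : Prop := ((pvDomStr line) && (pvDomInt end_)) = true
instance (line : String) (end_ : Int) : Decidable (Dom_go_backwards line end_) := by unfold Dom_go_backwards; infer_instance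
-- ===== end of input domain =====

-- B collects the trailing digit run by one boundary scan plus one slice, instead of A's per-char accumulation and final reverse (objective: simpler).

-- ===== PORT A =====
-- loop 'for c in reversed(line[:end]): if c.isdigit(): part_number += c else: break'
def goBackA : List Char → List Char → List Char
  | [], acc => acc
  | c :: rest, acc => if PySem.Chars.isdigit c then goBackA rest (acc ++ [c]) else acc

def go_backwards (line : String) (end_ : Int) : String :=
  String.ofList ((goBackA (PySem.List.slice line.toList none (some end_)).reverse []).reverse)

-- ===== PORT B =====
-- 'i = len(prefix); while i > 0 and prefix[i-1].isdigit(): i -= 1'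
def goBackBIdx (pref : List Char) : Nat → Nat
  | 0 => 0
  | i + 1 => if PySem.Chars.isdigit (pref.getD i ' ') then goBackBIdx pref i else i + 1

def go_backwards_alt (line : String) (end_ : Int) : String :=
  let pref := PySem.List.slice line.toList none (some end_)
  String.ofList (pref.drop (goBackBIdx pref pref.length))

-- ===== PRECONDITION & SPEC =====
def Spec_go_backwards (line : String) (end_ : Int) (out : String) : Prop := out = go_backwards_alt line end_
instance (line : String) (end_ : Int) (out : String) : Decidable (Spec_go_backwards line end_ out) := by unfold Spec_go_backwards; infer_instance

-- ===== CLAIM (what is proved, stated in full; the proofs are below) =====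
def Claim_equal_go_backwards : Prop := ∀ (line : String) (end_ : Int), Dom_go_backwards line end_ → Spec_go_backwards line end_ (go_backwards line end_)

-- ===== LEMMAS AND PROOFS =====

theorem goBackA_eq (l acc : List Char) : goBackA l acc = acc ++ l.takeWhile PySem.Chars.isdigit := by
  induction l generalizing acc with
  | nil => simp [goBackA]
  | cons c rest ih =>
      by_cases h : PySem.Chars.isdigit c = true
      · simp [goBackA, h, ih]
      · simp [goBackA, h]

theorem goBackBIdx_le (pref : List Char) (i : Nat) : goBackBIdx pref i ≤ i := by
  induction i with
  | zero => simp [goBackBIdx]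
  | succ i ih =>
      unfold goBackBIdx
      split
      · omega
      · omega

theorem goBackBIdx_append (x : Char) (xs : List Char) (i : Nat) (h : i ≤ xs.length) :
    goBackBIdx (xs ++ [x]) i = goBackBIdx xs i := by
  induction i with
  | zero => rfl
  | succ i ih =>
      unfold goBackBIdx
      have hget : (xs ++ [x]).getD i ' ' = xs.getD i ' ' := by
        have hi : i < xs.length := by omega
        simp [List.getD, List.getElem?_append_left hi]
      rw [hget, ih (by omega)]

theorem goBackB_main (pref : List Char) :
    pref.drop (goBackBIdx pref pref.length) = (pref.reverse.takeWhile PySem.Chars.isdigit).reverse := by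
  induction pref using List.reverseRecOn with
  | nil => rfl
  | append_singleton xs x ih =>
      have hlen : (xs ++ [x]).length = xs.length + 1 := by simp
      rw [hlen]
      unfold goBackBIdx
      have hget : (xs ++ [x]).getD xs.length ' ' = x := by
        simp [List.getD]
      rw [hget]
      by_cases h : PySem.Chars.isdigit x = true
      · rw [if_pos h, goBackBIdx_append x xs xs.length le_rfl]
        have hle := goBackBIdx_le xs xs.length
        rw [List.drop_append_of_le_length hle]
        simp [h, ih]
      · rw [if_neg h]
        simp [h]

-- ===== VERDICT (by name: the statement is the Claim_ definition above) =====
theorem go_backwards_spec : Claim_equal_go_backwards := by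
  intro line end_ _
  unfold Spec_go_backwards go_backwards go_backwards_alt
  show _ = String.ofList (List.drop (goBackBIdx (PySem.List.slice line.toList none (some end_)) (PySem.List.slice line.toList none (some end_)).length) (PySem.List.slice line.toList none (some end_)))
  rw [goBackA_eq, goBackB_main]
  simp
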